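-- pv_equiv track=rewrite | github.com/rowillia/advent-of-code | python/solutions/year2024/day09.py | parse
-- ===== SOURCE A (Python) =====
-- from collections import defaultdict
--
-- def parse(text):
--     memory = []
--     total_free = 0
--     free_list = defaultdict(list)
--     for chr in text.strip():
--         is_free = len(memory) % 2 == 1
--         val = int(chr)
--         if is_free:
--             memory.append([None] * val)
--             total_free += val
--             if val:
--                 free_list[val].append(len(memory) - 1)
--         else:
--             memory.append([len(memory) // 2] * val)
--     for free in free_list.values():
--         free.reverse()
--     return memory, total_free, free_list
-- ===== SOURCE B (Python) =====
-- from collections import defaultdict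
--
--
-- def parse(text):
--     digits = [int(c) for c in text.strip()]
--
--     def build(ds, fid):
--         """(memory blocks, free-block sizes) for digit list ds whose first block is file fid"""
--         if not ds:
--             return [], []
--         if len(ds) == 1:
--             return [[fid] * ds[0]], []
--         mem, frees = build(ds[2:], fid + 1)
--         return [[fid] * ds[0], [None] * ds[1]] + mem, [ds[1]] + frees
--
--     memory, frees = build(digits, 0)
--     free_list = defaultdict(list)
--     for v in dict.fromkeys(v for v in frees if v):
--         free_list[v] = [2 * k + 1 for k in range(len(frees) - 1, -1, -1)
--                         if frees[k] == v]
--     return memory, sum(frees), free_list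
-- ===== Notes on version B (the rewrite author's own statement) =====
-- stated objective: alternative
-- what changed: B replaces A's single stateful loop (interleaved memory building, free counting, and per-size append-then-reverse on a defaultdict) by a pairwise recursion over digit pairs that yields memory and the free sizes at once, then computes total_free as sum(frees) and fills free_list per distinct size (dict.fromkeys order) with one descending index scan each, so no list is ever reversed or appended to incrementally.
import Mathlib
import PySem

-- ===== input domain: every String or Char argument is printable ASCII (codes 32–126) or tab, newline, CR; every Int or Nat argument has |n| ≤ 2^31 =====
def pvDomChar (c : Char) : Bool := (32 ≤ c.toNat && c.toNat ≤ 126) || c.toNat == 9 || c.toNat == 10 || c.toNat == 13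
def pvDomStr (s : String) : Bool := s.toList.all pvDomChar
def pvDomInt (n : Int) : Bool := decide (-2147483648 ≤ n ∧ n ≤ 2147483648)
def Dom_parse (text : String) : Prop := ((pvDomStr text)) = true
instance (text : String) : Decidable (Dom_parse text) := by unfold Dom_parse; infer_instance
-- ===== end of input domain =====

-- B rebuilds the parser by a pairwise recursion over the digit pairs (memory and the free
-- sizes at once) and then fills free_list per distinct size with one descending index scan,
-- so A's append-then-reverse dict loop disappears; objective: alternative decomposition.

-- ===== PORT A =====
-- int(chr) on a single char; ValueError (non-digit) is excluded by Pre_parse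
def pvDigit (c : Char) : Int := (PySem.Int.ofChars? [c]).getD 0

-- body of A's single for-loop (state = (memory, total_free, free_list));
-- 'free_list[val].append(x)' on a defaultdict(list) is exactly Dict.modify val [] (· ++ [x])
def pvStepA (st : List (List (Option Int)) × Int × PySem.Dict Int (List Int)) (c : Char) :
    List (List (Option Int)) × Int × PySem.Dict Int (List Int) :=
  let memory := st.1
  let total_free := st.2.1
  let free_list := st.2.2
  let isFree := memory.length % 2 == 1
  let val := pvDigit c
  if isFree then
    let memory' := memory ++ [List.replicate val.toNat (none : Option Int)]
    (memory', total_free + val,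
      if val ≠ 0 then
        free_list.modify val [] (· ++ [((memory'.length : Int) - 1)])
      else free_list)
  else
    (memory ++ [List.replicate val.toNat (some (PySem.Int.floordiv (memory.length : Int) 2))],
      total_free, free_list)

def parse (text : String) : List (List (Option Int)) × Int × (List (Int × List Int)) :=
  let r := (PySem.Chars.strip text.toList).foldl pvStepA ([], 0, PySem.Dict.empty)
  -- for free in free_list.values(): free.reverse()
  (r.1, r.2.1, r.2.2.items.map (fun p => (p.1, p.2.reverse)))

-- ===== PORT B =====
-- def build(ds, fid): the pairwise recursion returning (memory blocks, free-block sizes)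
def pvBuild : List Int → Int → List (List (Option Int)) × List Int
  | [], _ => ([], [])
  | [a], fid => ([List.replicate a.toNat (some fid)], [])
  | a :: b :: rest, fid =>
    let r := pvBuild rest (fid + 1)
    (List.replicate a.toNat (some fid) :: List.replicate b.toNat (none : Option Int) :: r.1,
     b :: r.2)

-- [2*k+1 for k in range(len(frees)-1, -1, -1) if frees[k] == v]
-- (every k the range yields is in range, so the total pyGetD is exact there)
def pvDescIdx (frees : List Int) (v : Int) : List Int :=
  ((PySem.List.pyRange ((frees.length : Int) - 1) (-1) (-1)).filter
      (fun k => PySem.List.pyGetD frees k 0 == v)).map (fun k => 2 * k + 1)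

def parse_alt (text : String) : List (List (Option Int)) × Int × (List (Int × List Int)) :=
  let digits := (PySem.Chars.strip text.toList).map pvDigit
  let r := pvBuild digits 0
  let frees := r.2
  -- for v in dict.fromkeys(v for v in frees if v): free_list[v] = [...]
  let free_list := (PySem.List.dedup (frees.filter (fun v => v ≠ 0))).foldl
      (fun d v => d.insert v (pvDescIdx frees v)) PySem.Dict.empty
  (r.1, frees.sum, free_list.items)

-- ===== PRECONDITION & SPEC =====
-- Pre_parse: every character of text.strip() is a decimal digit — on any other
-- character int(chr) raises ValueError in A.
def Pre_parse (text : String) : Prop :=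
  (PySem.Chars.strip text.toList).all PySem.Chars.isdigit = true
instance (text : String) : Decidable (Pre_parse text) := by unfold Pre_parse; infer_instance

def pvWitness_parse : String := "12345"

def Spec_parse (text : String) (out : List (List (Option Int)) × Int × (List (Int × List Int))) : Prop := out = parse_alt text
instance (text : String) (out : List (List (Option Int)) × Int × (List (Int × List Int))) : Decidable (Spec_parse text out) := by unfold Spec_parse; infer_instance

-- ===== CLAIM (what is proved, stated in full; the proofs are below) =====
def Claim_equal_parse : Prop := ∀ (text : String), Dom_parse text → Pre_parse text → Spec_parse text (parse text)

-- ===== LEMMAS AND PROOFS =====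

-- A's two loop branches, isolated
theorem pvStepA_even (m : List (List (Option Int))) (t : Int) (f : PySem.Dict Int (List Int))
    (c : Char) (h : m.length % 2 = 0) :
    pvStepA (m, t, f) c
      = (m ++ [List.replicate (pvDigit c).toNat
          (some (PySem.Int.floordiv (m.length : Int) 2))], t, f) := by
  have hev : (m.length % 2 == 1) = false := by simp; omega
  simp only [pvStepA, hev, Bool.false_eq_true, if_false]

theorem pvStepA_odd (m : List (List (Option Int))) (t : Int) (f : PySem.Dict Int (List Int))
    (c : Char) (h : m.length % 2 = 1) :
    pvStepA (m, t, f) c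
      = (m ++ [List.replicate (pvDigit c).toNat (none : Option Int)], t + pvDigit c,
         if pvDigit c ≠ 0 then f.modify (pvDigit c) [] (· ++ [(m.length : Int)]) else f) := by
  have hod : (m.length % 2 == 1) = true := by simp [h]
  have hidx : (((m ++ [List.replicate (pvDigit c).toNat (none : Option Int)]).length : Int) - 1)
      = (m.length : Int) := by simp
  simp only [pvStepA, hod, if_true, hidx]

-- the (size, absolute index) pairs of the nonzero free blocks, in A's forward order
def pvOps : List Int → Int → List (Int × Int)
  | [], _ => []
  | [_], _ => []
  | _ :: b :: rest, fid =>
    (if b ≠ 0 then [(b, 2 * fid + 1)] else []) ++ pvOps rest (fid + 1)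

-- A's dict-building loop as a fold over those pairs
def pvDictA (l : List (Int × Int)) (f : PySem.Dict Int (List Int)) : PySem.Dict Int (List Int) :=
  l.foldl (fun d p => d.modify p.1 [] (· ++ [p.2])) f

-- A's whole loop, in closed form over the pairwise recursion
theorem pvMainA : ∀ (cs : List Char) (fid : Int) (m : List (List (Option Int))) (t : Int)
    (f : PySem.Dict Int (List Int)), (m.length : Int) = 2 * fid →
    cs.foldl pvStepA (m, t, f)
      = (m ++ (pvBuild (cs.map pvDigit) fid).1,
         t + (pvBuild (cs.map pvDigit) fid).2.sum,
         pvDictA (pvOps (cs.map pvDigit) fid) f)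
  | [], fid, m, t, f, hm => by simp [pvBuild, pvOps, pvDictA]
  | [c], fid, m, t, f, hm => by
    have hfd : PySem.Int.floordiv (m.length : Int) 2 = fid := by
      rw [PySem.Int.floordiv_eq_ediv_of_pos (by omega)]; omega
    simp only [List.map_cons, List.map_nil, List.foldl_cons, List.foldl_nil,
      pvStepA_even m t f c (by omega), hfd, pvBuild, pvOps, pvDictA, List.foldl_nil,
      List.sum_nil, add_zero]
  | c1 :: c2 :: rest, fid, m, t, f, hm => by
    have hfd : PySem.Int.floordiv (m.length : Int) 2 = fid := by
      rw [PySem.Int.floordiv_eq_ediv_of_pos (by omega)]; omega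
    have hlen1 : (m ++ [List.replicate (pvDigit c1).toNat (some fid)]).length % 2 = 1 := by
      simp; omega
    have hidx1 : ((m ++ [List.replicate (pvDigit c1).toNat (some fid)]).length : Int)
        = 2 * fid + 1 := by simp; omega
    have hIH := pvMainA rest (fid + 1)
      (m ++ [List.replicate (pvDigit c1).toNat (some fid)]
         ++ [List.replicate (pvDigit c2).toNat (none : Option Int)])
      (t + pvDigit c2)
      (if pvDigit c2 ≠ 0 then f.modify (pvDigit c2) [] (· ++ [2 * fid + 1]) else f)
      (by simp; omega)
    simp only [List.map_cons, List.foldl_cons]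
    rw [pvStepA_even m t f c1 (by omega), hfd,
        pvStepA_odd _ t f c2 hlen1, hidx1, hIH]
    refine Prod.ext ?_ (Prod.ext ?_ ?_)
    · show _ = m ++ (pvBuild (pvDigit c1 :: pvDigit c2 :: rest.map pvDigit) fid).1
      rw [pvBuild]
      simp
    · show _ = t + (pvBuild (pvDigit c1 :: pvDigit c2 :: rest.map pvDigit) fid).2.sum
      rw [pvBuild]
      simp; ring
    · show pvDictA (pvOps (rest.map pvDigit) (fid + 1)) _
          = pvDictA (pvOps (pvDigit c1 :: pvDigit c2 :: rest.map pvDigit) fid) f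
      rw [pvOps]
      by_cases h2 : pvDigit c2 = 0
      · simp [h2, pvDictA]
      · simp only [h2, ne_eq, not_false_iff, if_true, List.singleton_append]
        simp [pvDictA]

-- pvOps as the filtered enumeration of the free sizes
theorem pvOps_eq : ∀ (ds : List Int) (fid : Int),
    pvOps ds fid
      = ((PySem.List.enumerate (pvBuild ds fid).2 fid).filter (fun p => p.2 ≠ 0)).map
          (fun p => (p.2, 2 * p.1 + 1))
  | [], fid => by simp [pvOps, pvBuild]
  | [a], fid => by simp [pvOps, pvBuild]
  | a :: b :: rest, fid => by
    rw [pvOps, pvBuild]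
    show _ = ((PySem.List.enumerate (b :: (pvBuild rest (fid+1)).2) fid).filter _).map _
    rw [PySem.List.enumerate_cons, pvOps_eq rest (fid + 1)]
    by_cases hb : b = 0
    · simp [hb]
    · simp [hb]

-- items of A's dict after its per-value reverse: keys in first-occurrence order,
-- each value the reversed forward index list
theorem pvItemsA (l : List (Int × Int)) :
    (pvDictA l PySem.Dict.empty).items.map (fun p => (p.1, p.2.reverse))
      = (PySem.List.dedup (l.map (·.1))).map
          (fun v => (v, ((l.filter (fun p => p.1 == v)).map (·.2)).reverse)) := by
  have hnd : (pvDictA l PySem.Dict.empty).keys.Nodup := by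
    unfold pvDictA
    exact PySem.Dict.nodup_keys_foldl_modify_key l (·.1) [] (fun d x => (· ++ [x.2]))
      PySem.Dict.empty (by simp)
  have hkeys : (pvDictA l PySem.Dict.empty).keys = PySem.List.dedup (l.map (·.1)) := by
    unfold pvDictA
    rw [PySem.Dict.keys_foldl_modify_key]
    show PySem.Set.update [] (l.map (·.1)) = _
    rfl
  rw [PySem.Dict.items_eq_map_keys _ hnd [], hkeys, List.map_map]
  refine List.map_congr_left ?_
  intro v _
  simp only [Function.comp]
  congr 1
  have : (pvDictA l PySem.Dict.empty).getD v []
      = (l.filter (fun p => p.1 == v)).map (·.2) := by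
    unfold pvDictA
    rw [PySem.Dict.getD_foldl_modify_append]
    simp
  rw [this]

-- B's per-size descending scan is the reverse of the forward index list
theorem pvDesc_eq (frees : List Int) (v : Int) :
    pvDescIdx frees v
      = (((PySem.List.enumerate frees 0).filter (fun p => p.2 == v)).map
          (fun p => 2 * p.1 + 1)).reverse := by
  unfold pvDescIdx
  rw [PySem.List.pyRange_neg_one_eq_reverse]
  have h01 : (-1 : Int) + 1 = 0 := by norm_num
  have h02 : ((frees.length : Int) - 1) + 1 = (frees.length : Int) := by ring
  rw [h01, h02, List.filter_reverse, List.map_reverse]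
  congr 1
  rw [PySem.List.enumerate_eq_map_pyRange (d := 0), List.filter_map, List.map_map]
  rfl

-- per nonzero size, A's reversed forward list is B's descending scan
theorem pvVal_eq (frees : List Int) (v : Int) (hv : v ≠ 0) :
    (((((PySem.List.enumerate frees 0).filter (fun p => p.2 ≠ 0)).map
        (fun p => ((p.2 : Int), 2 * p.1 + 1))).filter (fun p => p.1 == v)).map (·.2)).reverse
      = pvDescIdx frees v := by
  rw [pvDesc_eq, List.filter_map, List.map_map, List.filter_filter]
  congr 1
  show ((PySem.List.enumerate frees 0).filter _).map (fun p => 2 * p.1 + 1) = _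
  congr 1
  refine List.filter_congr ?_
  intro p _
  by_cases h : p.2 = v
  · simp [h, hv]
  · simp [h]

theorem pvParse_eq (text : String) : parse text = parse_alt text := by
  unfold parse parse_alt
  dsimp only
  rw [pvMainA (PySem.Chars.strip text.toList) 0 [] 0 PySem.Dict.empty (by simp)]
  refine Prod.ext (by rw [List.nil_append]) (Prod.ext (by rw [zero_add]) ?_)
  show (pvDictA (pvOps ((PySem.Chars.strip text.toList).map pvDigit) 0)
      PySem.Dict.empty).items.map (fun p => (p.1, p.2.reverse)) = _
  rw [pvItemsA, pvOps_eq]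
  set frees := (pvBuild ((PySem.Chars.strip text.toList).map pvDigit) 0).2 with hfrees
  -- (a) the key list is the nonzero free sizes, first occurrences in order
  have ha : ((((PySem.List.enumerate frees 0).filter (fun p => p.2 ≠ 0)).map
        (fun p => ((p.2 : Int), 2 * p.1 + 1))).map (·.1))
      = frees.filter (fun v => v ≠ 0) := by
    rw [List.map_map]
    have h2 : frees.filter (fun v => v ≠ 0)
        = ((PySem.List.enumerate frees 0).map (·.2)).filter (fun v => v ≠ 0) := by
      rw [PySem.List.map_snd_enumerate]
    rw [h2, List.filter_map]
    rfl
  -- (c) B's loop inserts fresh distinct keys, so its items are a map over the key list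
  have hc : ((PySem.List.dedup (frees.filter (fun v => v ≠ 0))).foldl
        (fun d v => d.insert v (pvDescIdx frees v)) PySem.Dict.empty).items
      = (PySem.List.dedup (frees.filter (fun v => v ≠ 0))).map
          (fun v => (v, pvDescIdx frees v)) := by
    have h3 := PySem.Dict.items_foldl_insert_fresh
      (l := PySem.List.dedup (frees.filter (fun v => v ≠ 0)))
      (k := fun v => v) (v := fun v => pvDescIdx frees v) (d := PySem.Dict.empty)
      (by intro a _; simp) (by simpa using PySem.List.nodup_dedup _)
    simpa using h3
  rw [hc, ha]
  refine List.map_congr_left ?_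
  intro v hv
  have hvne : v ≠ 0 := by
    have h1 := (PySem.List.mem_dedup _ v).mp hv
    exact of_decide_eq_true (List.mem_filter.mp h1).2
  rw [← pvVal_eq frees v hvne]

-- ===== VERDICT (by name: the statement is the Claim_ definition above) =====
theorem parse_spec : Claim_equal_parse := by
  intro text _ _
  exact pvParse_eq text
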